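-- pv_equiv track=rewrite | github.com/LeeJc02/CS61A-fa23 | Lab/lab06/lab06/lab06.py | insert_items
-- ===== SOURCE A (Python) =====
-- def insert_items(s, before, after):
--     """Insert after into s after each occurrence of before and then return s.
--
--     >>> test_s = [1, 5, 8, 5, 2, 3]
--     >>> new_s = insert_items(test_s, 5, 7)
--     >>> new_s
--     [1, 5, 7, 8, 5, 7, 2, 3]
--     >>> test_s
--     [1, 5, 7, 8, 5, 7, 2, 3]
--     >>> new_s is test_s
--     True
--     >>> double_s = [1, 2, 1, 2, 3, 3]
--     >>> double_s = insert_items(double_s, 3, 4)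
--     >>> double_s
--     [1, 2, 1, 2, 3, 4, 3, 4]
--     >>> large_s = [1, 4, 8]
--     >>> large_s2 = insert_items(large_s, 4, 4)
--     >>> large_s2
--     [1, 4, 4, 8]
--     >>> large_s3 = insert_items(large_s2, 4, 6)
--     >>> large_s3
--     [1, 4, 6, 4, 6, 8]
--     >>> large_s3 is large_s
--     True
--     """
--     "*** YOUR CODE HERE ***"
--     ls = []
--     k  = 0
--     for i in range(len(s)):
--         if s[i] == before:
--             ls.append(i+1+k)
--             k += 1
--     for i in ls:
--         s.insert(i, after)
--     return s
-- ===== SOURCE B (Python) =====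
-- def insert_items(s, before, after):
--     for i in range(len(s) - 1, -1, -1):
--         if s[i] == before:
--             s.insert(i + 1, after)
--     return s
-- ===== Notes on version B (the rewrite author's own statement) =====
-- stated objective: simpler
-- what changed: A first builds a table of offset-adjusted insertion positions in one pass and then inserts at each of them in a second pass; B is a single backward pass that inserts right after each occurrence directly, needing no position table or offset counter.
import Mathlib
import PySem

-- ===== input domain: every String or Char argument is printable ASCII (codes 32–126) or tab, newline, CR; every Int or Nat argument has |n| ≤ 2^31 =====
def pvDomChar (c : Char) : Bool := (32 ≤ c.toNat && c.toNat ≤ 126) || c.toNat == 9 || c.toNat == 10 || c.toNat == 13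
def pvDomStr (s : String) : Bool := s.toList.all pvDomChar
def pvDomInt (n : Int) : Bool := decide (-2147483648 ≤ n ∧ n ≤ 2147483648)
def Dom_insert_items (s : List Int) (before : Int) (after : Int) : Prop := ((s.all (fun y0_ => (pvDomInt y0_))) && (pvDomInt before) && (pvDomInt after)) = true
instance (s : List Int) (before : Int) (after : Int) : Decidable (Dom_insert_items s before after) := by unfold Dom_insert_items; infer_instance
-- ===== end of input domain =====

-- B replaces A's two passes (build an offset-adjusted position table, then insert at each
-- position) by a single backward index pass inserting directly after each occurrence;
-- objective: simpler.  Both Pythons mutate s in place identically; the theorems are about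
-- the returned value.

-- ===== PORT A =====
def insert_items (s : List Int) (before : Int) (after : Int) : List Int :=
  -- ls = []; k = 0; for i in range(len(s)): if s[i] == before: ls.append(i+1+k); k += 1
  ((PySem.List.pyRange 0 (s.length : Int) 1).foldl
    (fun (st : List Int × Int) i =>
      if PySem.List.pyGetD s i 0 == before then (st.1 ++ [i + 1 + st.2], st.2 + 1) else st)
    ([], 0)).1.foldl
    -- for i in ls: s.insert(i, after); return s
    (fun acc i => PySem.List.insert acc i after) s

-- ===== PORT B =====
def insert_items_alt (s : List Int) (before : Int) (after : Int) : List Int :=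
  -- for i in range(len(s)-1, -1, -1): if s[i] == before: s.insert(i+1, after); return s
  (PySem.List.pyRange ((s.length : Int) - 1) (-1) (-1)).foldl
    (fun acc i =>
      if PySem.List.pyGetD acc i 0 == before then PySem.List.insert acc (i + 1) after else acc)
    s

-- ===== PRECONDITION & SPEC =====
def Spec_insert_items (s : List Int) (before : Int) (after : Int) (out : List Int) : Prop := out = insert_items_alt s before after
instance (s : List Int) (before : Int) (after : Int) (out : List Int) : Decidable (Spec_insert_items s before after out) := by unfold Spec_insert_items; infer_instance

-- ===== CLAIM (what is proved, stated in full; the proofs are below) =====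
def Claim_equal_insert_items : Prop := ∀ (s : List Int) (before : Int) (after : Int), Dom_insert_items s before after → Spec_insert_items s before after (insert_items s before after)

-- ===== LEMMAS AND PROOFS =====

-- the common specification: duplicate `after` behind each occurrence of `before`
def dup (before after : Int) (s : List Int) : List Int :=
  s.flatMap (fun x => if x == before then [x, after] else [x])

-- the position table A's first loop builds, as a recursion on s (base = index + offset so far)
def posList (before : Int) : List Int → Int → List Int
  | [], _ => []
  | x :: t, b => if x == before then (b + 1) :: posList before t (b + 2) else posList before t (b + 1)

theorem dup_append (before after : Int) (u v : List Int) :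
    dup before after (u ++ v) = dup before after u ++ dup before after v := by
  simp [dup]

-- A's first loop, read over enumerate, produces posList
theorem lemA1 (before : Int) : ∀ (s : List Int) (i k : Int) (acc : List Int),
    ((PySem.List.enumerate s i).foldl
      (fun (st : List Int × Int) p =>
        if p.2 == before then (st.1 ++ [p.1 + 1 + st.2], st.2 + 1) else st) (acc, k)).1
      = acc ++ posList before s (i + k) := by
  intro s
  induction s with
  | nil => intro i k acc; simp [PySem.List.enumerate_nil, posList]
  | cons x t ih =>
    intro i k acc
    rw [PySem.List.enumerate_cons]
    simp only [List.foldl_cons, posList]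
    by_cases hx : x == before
    · rw [if_pos hx, if_pos hx, ih]
      have h2 : i + 1 + (k + 1) = i + k + 2 := by ring
      rw [h2]
      simp
      omega
    · rw [if_neg hx, if_neg hx, ih]
      have h2 : i + 1 + k = i + k + 1 := by ring
      rw [h2]

-- inserting `after` at the posList positions realizes dup
theorem lemA2 (before after : Int) : ∀ (s pre : List Int),
    (posList before s (pre.length : Int)).foldl
        (fun acc i => PySem.List.insert acc i after) (pre ++ s)
      = pre ++ dup before after s := by
  intro s
  induction s with
  | nil => intro pre; simp [posList, dup]
  | cons x t ih =>
    intro pre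
    simp only [posList]
    by_cases hx : x == before
    · rw [if_pos hx]
      simp only [List.foldl_cons]
      have hins : PySem.List.insert (pre ++ x :: t) ((pre.length : Int) + 1) after
          = (pre ++ [x, after]) ++ t := by
        have hc : ((pre.length : Int) + 1) = ((pre.length + 1 : Nat) : Int) := by push_cast; ring
        rw [hc, PySem.List.insert_natCast _ _ _ (by simp)]
        have h1 : pre ++ x :: t = (pre ++ [x]) ++ t := by simp
        rw [h1, List.take_left' (by simp), List.drop_left' (by simp)]
        simp
      have hl2 : (pre.length : Int) + 2 = (((pre ++ [x, after]).length : Nat) : Int) := by simp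
      have hxx : x = before := by simpa using hx
      rw [hins, hl2, ih (pre ++ [x, after])]
      simp [dup, hxx]
    · rw [if_neg hx]
      have hl1 : (pre.length : Int) + 1 = (((pre ++ [x]).length : Nat) : Int) := by simp
      have hxx : ¬ x = before := by simpa using hx
      have h1 : pre ++ x :: t = (pre ++ [x]) ++ t := by simp
      rw [hl1, h1, ih (pre ++ [x])]
      simp [dup, hxx]

-- A's port equals dup
theorem A_eq_dup (s : List Int) (before after : Int) :
    insert_items s before after = dup before after s := by
  unfold insert_items
  have hb : (PySem.List.pyRange 0 (s.length : Int) 1).foldl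
      (fun (st : List Int × Int) i =>
        if PySem.List.pyGetD s i 0 == before then (st.1 ++ [i + 1 + st.2], st.2 + 1) else st)
      ([], 0)
      = (PySem.List.enumerate s 0).foldl
      (fun (st : List Int × Int) p =>
        if p.2 == before then (st.1 ++ [p.1 + 1 + st.2], st.2 + 1) else st) ([], 0) := by
    rw [PySem.List.enumerate_eq_map_pyRange (d := 0), List.foldl_map]
    simp
  rw [hb]
  have h1 := lemA1 before s 0 0 []
  simp only [zero_add, List.nil_append] at h1
  rw [h1]
  have h2 := lemA2 before after s []
  simp only [List.nil_append, List.length_nil, Nat.cast_zero] at h2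
  exact h2

-- B's backward pass equals dup (tail = the already-processed suffix)
theorem lemB (before after : Int) : ∀ (t tail : List Int),
    (PySem.List.pyRange ((t.length : Int) - 1) (-1) (-1)).foldl
      (fun acc i =>
        if PySem.List.pyGetD acc i 0 == before then PySem.List.insert acc (i + 1) after else acc)
      (t ++ tail)
      = dup before after t ++ tail := by
  intro t
  induction t using List.reverseRecOn with
  | nil =>
    intro tail
    rw [PySem.List.pyRange_neg_one_eq_nil (by simp)]
    simp [dup]
  | append_singleton u x ih =>
    intro tail
    have hlen : ((u ++ [x]).length : Int) - 1 = (u.length : Int) := by simp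
    rw [hlen, PySem.List.pyRange_neg_one_cons (by omega)]
    simp only [List.foldl_cons]
    have hsh : (u ++ [x]) ++ tail = u ++ (x :: tail) := by simp
    have hget : PySem.List.pyGetD ((u ++ [x]) ++ tail) (u.length : Int) 0 = x := by
      rw [hsh, PySem.List.pyGetD_natCast]
      simp [List.getD]
    rw [hget]
    by_cases hx : x == before
    · have hxx : x = before := by simpa using hx
      have hins : PySem.List.insert ((u ++ [x]) ++ tail) ((u.length : Int) + 1) after
          = u ++ (x :: after :: tail) := by
        have hc : ((u.length : Int) + 1) = ((u.length + 1 : Nat) : Int) := by push_cast; ring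
        rw [hc, PySem.List.insert_natCast _ _ _ (by simp)]
        rw [List.take_left' (by simp), List.drop_left' (by simp)]
        simp
      rw [if_pos hx, hins, ih (x :: after :: tail)]
      rw [dup_append]
      simp [dup, hxx]
    · have hxx : ¬ x = before := by simpa using hx
      rw [if_neg hx, hsh, ih (x :: tail)]
      rw [dup_append]
      simp [dup, hxx]

theorem B_eq_dup (s : List Int) (before after : Int) :
    insert_items_alt s before after = dup before after s := by
  unfold insert_items_alt
  have := lemB before after s []
  simpa using this

-- ===== VERDICT (by name: the statement is the Claim_ definition above) =====
theorem insert_items_spec : Claim_equal_insert_items := by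
  intro s before after _
  unfold Spec_insert_items
  rw [A_eq_dup, B_eq_dup]
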